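-- pv_equiv track=rewrite | github.com/gemail1024/yhjf | test.py | decimal_to_zws
-- ===== SOURCE A (Python) =====
-- zero_width_chars = [
--     '\u200b',  # 零宽空格 ZERO WIDTH SPACE
--     '\u200c',  # 零宽非连接符 ZERO WIDTH NON-JOINER
--     '\u200d',  # 零宽连接符 ZERO WIDTH JOINER
--     '\u2060',  # 词组连接符 WORD JOINER
--     '\ufeff',  # 零宽非断空格 ZERO WIDTH NO-BREAK SPACE
-- ]
--
-- def decimal_to_zws(decimal_num):
--     """将十进制数转换为零宽字符串"""
--     # 零宽字符集合（相当于5进制数的0-4）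
--
--     if decimal_num == 0:
--         return zero_width_chars[0]
--
--     zws = ''
--     # 将十进制数转换为5进制数，并映射到零宽字符
--     while decimal_num:
--         decimal_num, remainder = divmod(decimal_num, 5)
--         zws = zero_width_chars[remainder] + zws
--     return zws
-- ===== SOURCE B (Python) =====
-- zero_width_chars = [
--     '\u200b',
--     '\u200c',
--     '\u200d',
--     '\u2060',
--     '\ufeff',
-- ]
--
-- def decimal_to_zws(decimal_num):
--     """将十进制数转换为零宽字符串"""
--     if decimal_num == 0:
--         return zero_width_chars[0]
--     # stage 1: count the base-5 digits of the number
--     d = 0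
--     p = 1
--     while p <= decimal_num:
--         p *= 5
--         d += 1
--     # stage 2: emit digits most-significant-first by positional powers
--     zws = ''
--     for i in reversed(range(d)):
--         zws += zero_width_chars[(decimal_num // 5 ** i) % 5]
--     return zws
-- ===== Notes on version B (the rewrite author's own statement) =====
-- stated objective: alternative
-- what changed: Replaces A's single divmod while-loop that prepends digits with a two-stage positional algorithm: first count the base-5 digits with a power loop, then emit each digit most-significant-first as (n // 5**i) % 5, appending.
import Mathlib
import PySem

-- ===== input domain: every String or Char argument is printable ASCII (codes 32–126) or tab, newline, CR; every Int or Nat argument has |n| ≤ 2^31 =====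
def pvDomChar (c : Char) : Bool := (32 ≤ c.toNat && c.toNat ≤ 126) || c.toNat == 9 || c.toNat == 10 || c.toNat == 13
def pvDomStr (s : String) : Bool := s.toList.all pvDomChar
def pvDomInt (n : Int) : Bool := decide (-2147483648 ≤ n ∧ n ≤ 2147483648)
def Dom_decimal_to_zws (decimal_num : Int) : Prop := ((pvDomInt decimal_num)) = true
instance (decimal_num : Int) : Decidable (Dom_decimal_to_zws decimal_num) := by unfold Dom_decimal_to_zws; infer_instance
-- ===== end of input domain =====

-- B replaces A's divmod-and-prepend while-loop by a two-stage positional algorithm: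
-- count the base-5 digits, then emit (n // 5**i) % 5 most-significant-first (objective: alternative).

-- ===== PORT A =====
-- the module-level list zero_width_chars
def zwsChars : List String := ["\u200b", "\u200c", "\u200d", "\u2060", "\ufeff"]

-- `zero_width_chars[r]`; for r = n % 5 the index is always in range, so getD's default is never used
def zwsAt (r : Int) : String := (PySem.List.pyGet? zwsChars r).getD ""

-- the `while decimal_num:` loop; on negative input Python never terminates (those inputs
-- are outside Pre_), so the port returns the accumulator there
def zwsLoopA (n : Int) (zws : String) : String :=
  if n ≤ 0 then zws
  else zwsLoopA (PySem.Int.floordiv n 5) (zwsAt (PySem.Int.mod n 5) ++ zws)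
termination_by n.toNat
decreasing_by
  have h5 : PySem.Int.floordiv n 5 = n / 5 := PySem.Int.floordiv_eq_ediv_of_pos (by omega)
  have : n / 5 < n := by omega
  have : 0 ≤ n / 5 := by omega
  omega

def decimal_to_zws (decimal_num : Int) : String :=
  if decimal_num = 0 then zwsAt 0
  else zwsLoopA decimal_num ""

-- ===== PORT B =====
-- stage 1: `while p <= decimal_num: p *= 5; d += 1`; the conjunct 0 < p serves termination
-- only — on every actual call p is a positive power of five
def zwsCountB (n p d : Int) : Int :=
  if 0 < p ∧ p ≤ n then zwsCountB n (p * 5) (d + 1) else d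
termination_by (n + 1 - p).toNat
decreasing_by omega

-- stage 2: `for i in reversed(range(d)): zws += zero_width_chars[(n // 5**i) % 5]`;
-- `5 ** i` with i drawn from range(d) is `5 ^ i.toNat` exactly (i is never negative there)
def zwsEmitB (n d : Int) : String :=
  ((PySem.List.pyRange 0 d 1).reverse).foldl
    (fun zws i => zws ++ zwsAt (PySem.Int.mod (PySem.Int.floordiv n (5 ^ i.toNat)) 5)) ""

def decimal_to_zws_alt (decimal_num : Int) : String :=
  if decimal_num = 0 then zwsAt 0
  else zwsEmitB decimal_num (zwsCountB decimal_num 1 0)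

-- ===== PRECONDITION & SPEC =====
-- Pre_ excludes negative inputs, on which Python A's while-loop never terminates (divmod
-- by 5 floors toward -inf, so decimal_num never reaches 0): A returns on exactly 0 ≤ n.
def Pre_decimal_to_zws (decimal_num : Int) : Prop := 0 ≤ decimal_num
instance (decimal_num : Int) : Decidable (Pre_decimal_to_zws decimal_num) := by unfold Pre_decimal_to_zws; infer_instance
def pvWitness_decimal_to_zws : Int := 13

def Spec_decimal_to_zws (decimal_num : Int) (out : String) : Prop := out = decimal_to_zws_alt decimal_num
instance (decimal_num : Int) (out : String) : Decidable (Spec_decimal_to_zws decimal_num out) := by unfold Spec_decimal_to_zws; infer_instance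

-- ===== CLAIM (what is proved, stated in full; the proofs are below) =====
def Claim_equal_decimal_to_zws : Prop := ∀ (decimal_num : Int), Dom_decimal_to_zws decimal_num → Pre_decimal_to_zws decimal_num → Spec_decimal_to_zws decimal_num (decimal_to_zws decimal_num)

-- ===== LEMMAS AND PROOFS =====

-- one-step unfolding equation for stage 1 (for rewriting one side of a goal at a time)
theorem zwsCountB_eq (n p d : Int) :
    zwsCountB n p d = if 0 < p ∧ p ≤ n then zwsCountB n (p * 5) (d + 1) else d := by
  rw [zwsCountB]

-- proof-side view of stage 2 with a Nat digit count and plain ediv/emod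
def zwsPadN (n : Int) (k : Nat) : String :=
  ((List.range k).reverse).foldl (fun zws i => zws ++ zwsAt ((n / 5 ^ i) % 5)) ""

theorem zwsEmitB_eq_padN (n d : Int) : zwsEmitB n d = zwsPadN n d.toNat := by
  unfold zwsEmitB zwsPadN
  rw [PySem.List.pyRange_one, ← List.map_reverse, List.foldl_map]
  simp only [sub_zero]
  apply PySem.List.foldl_congr_mem
  intro zws i _
  have h5 : (0:Int) < 5 ^ (0 + (i:Int)).toNat := by positivity
  rw [PySem.Int.floordiv_eq_ediv_of_pos h5, PySem.Int.mod_eq_emod_of_pos (by norm_num : (0:Int) < 5)]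
  simp

theorem zwsPadN_succ (n : Int) (k : Nat) :
    zwsPadN n (k + 1) = zwsPadN (n / 5) k ++ zwsAt (n % 5) := by
  unfold zwsPadN
  rw [List.range_succ_eq_map, List.reverse_cons', List.concat_eq_append, List.foldl_concat]
  have hmap :
      ((List.range k).map Nat.succ).reverse.foldl
        (fun zws i => zws ++ zwsAt ((n / 5 ^ i) % 5)) ""
      = (List.range k).reverse.foldl (fun zws i => zws ++ zwsAt (((n / 5) / 5 ^ i) % 5)) "" := by
    rw [← List.map_reverse, List.foldl_map]
    apply PySem.List.foldl_congr_mem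
    intro zws i _
    rw [Nat.succ_eq_add_one, show n / 5 ^ (i + 1) = n / 5 / 5 ^ i by
      rw [Int.ediv_ediv_of_nonneg (by norm_num : (0:Int) ≤ 5), ← pow_succ']]
  rw [hmap]
  simp

-- stage-1 facts: the count is nonnegative, shifts down with n // 5, and offsets in d
theorem zwsCountB_nonneg (fuel : Nat) : ∀ (n p d : Int), (n + 1 - p).toNat ≤ fuel → 0 ≤ d →
    0 ≤ zwsCountB n p d := by
  induction fuel with
  | zero =>
    intro n p d hf hd
    rw [zwsCountB_eq]
    split_ifs with h
    · omega
    · exact hd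
  | succ fuel ih =>
    intro n p d hf hd
    rw [zwsCountB_eq]
    split_ifs with h
    · exact ih n (p * 5) (d + 1) (by omega) (by omega)
    · exact hd

theorem zwsCountB_shift (fuel : Nat) : ∀ (n p d : Int), (n + 1 - p * 5).toNat ≤ fuel →
    0 < p → 0 ≤ n → zwsCountB n (p * 5) d = zwsCountB (n / 5) p d := by
  induction fuel with
  | zero =>
    intro n p d hf hp hn
    have hiff : p * 5 ≤ n ↔ p ≤ n / 5 := (Int.le_ediv_iff_mul_le (by norm_num)).symm
    conv_lhs => rw [zwsCountB_eq]
    conv_rhs => rw [zwsCountB_eq]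
    split_ifs with h1 h2
    · omega
    · omega
    · omega
    · rfl
  | succ fuel ih =>
    intro n p d hf hp hn
    have hiff : p * 5 ≤ n ↔ p ≤ n / 5 := (Int.le_ediv_iff_mul_le (by norm_num)).symm
    conv_lhs => rw [zwsCountB_eq]
    conv_rhs => rw [zwsCountB_eq]
    split_ifs with h1 h2
    · exact ih n (p * 5) (d + 1) (by omega) (by omega) hn
    · omega
    · omega
    · rfl

theorem zwsCountB_offset (fuel : Nat) : ∀ (n p d : Int), (n + 1 - p).toNat ≤ fuel →
    zwsCountB n p d = zwsCountB n p 0 + d := by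
  induction fuel with
  | zero =>
    intro n p d hf
    conv_lhs => rw [zwsCountB_eq]
    conv_rhs => rw [zwsCountB_eq]
    split_ifs with h
    · omega
    · omega
  | succ fuel ih =>
    intro n p d hf
    conv_lhs => rw [zwsCountB_eq]
    conv_rhs => rw [zwsCountB_eq]
    split_ifs with h
    · rw [ih n (p * 5) (d + 1) (by omega), ih n (p * 5) (0 + 1) (by omega)]
      omega
    · omega

-- for 0 < n the digit count satisfies count n = count (n/5) + 1
theorem zwsCountB_step (n : Int) (hn : 0 < n) :
    zwsCountB n 1 0 = zwsCountB (n / 5) 1 0 + 1 := by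
  have hs := zwsCountB_shift (n + 1 - 1 * 5).toNat n 1 (0 + 1) le_rfl (by norm_num) (by omega)
  have ho := zwsCountB_offset (n / 5 + 1 - 1).toNat (n / 5) 1 (0 + 1) le_rfl
  norm_num at hs ho
  conv_lhs => rw [zwsCountB_eq]
  split_ifs with h
  · rw [show (5:Int) = 1 * 5 by norm_num] at hs
    norm_num at hs
    norm_num
    rw [hs, ho]
  · omega

-- A's loop produces exactly the positional digit string of length count n
theorem zwsLoopA_eq_pad (fuel : Nat) : ∀ (n : Int), 0 < n → n.toNat ≤ fuel → ∀ (zws : String),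
    zwsLoopA n zws = zwsPadN n (zwsCountB n 1 0).toNat ++ zws := by
  induction fuel with
  | zero => intro n hn hf; omega
  | succ fuel ih =>
    intro n hn hf zws
    have h5 : PySem.Int.floordiv n 5 = n / 5 := PySem.Int.floordiv_eq_ediv_of_pos (by norm_num)
    have hm : PySem.Int.mod n 5 = n % 5 := PySem.Int.mod_eq_emod_of_pos (by norm_num)
    have hq0 : 0 ≤ n / 5 := by omega
    have hcnt : zwsCountB n 1 0 = zwsCountB (n / 5) 1 0 + 1 := zwsCountB_step n hn
    have hnn : 0 ≤ zwsCountB (n / 5) 1 0 :=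
      zwsCountB_nonneg (n / 5 + 1 - 1).toNat (n / 5) 1 0 le_rfl le_rfl
    have htn : (zwsCountB n 1 0).toNat = (zwsCountB (n / 5) 1 0).toNat + 1 := by omega
    rw [zwsLoopA]
    simp only [show ¬ n ≤ 0 by omega, if_false, h5, hm]
    rw [htn, zwsPadN_succ]
    by_cases hq : n / 5 = 0
    · rw [zwsLoopA]
      have hc0 : zwsCountB (0:Int) 1 0 = 0 := by rw [zwsCountB_eq]; norm_num
      rw [hq]
      simp [hc0, zwsPadN]
    · have hqpos : 0 < n / 5 := by omega
      have hlt : n / 5 < n := by omega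
      rw [ih (n / 5) hqpos (by omega) (zwsAt (n % 5) ++ zws), String.append_assoc]

-- ===== VERDICT (by name: the statement is the Claim_ definition above) =====
theorem decimal_to_zws_spec : Claim_equal_decimal_to_zws := by
  intro n _ hpre
  unfold Spec_decimal_to_zws decimal_to_zws decimal_to_zws_alt
  by_cases h : n = 0
  · simp [h]
  · have hn : 0 < n := by unfold Pre_decimal_to_zws at hpre; omega
    simp only [h, if_false]
    rw [zwsLoopA_eq_pad n.toNat n hn le_rfl "", zwsEmitB_eq_padN]
    simp
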